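-- pv_equiv track=rewrite | github.com/GeoLiang90/sudokuSolver | sudoku-naive.py | rettbneighbors
-- ===== SOURCE A (Python) =====
-- Cliques=[
-- #Left to Right
-- [0,1,2,3,4,5,6,7,8],\
-- [9,10,11,12,13,14,15,16,17],\
-- [18,19,20,21,22,23,24,25,26],\
-- [27,28,29,30,31,32,33,34,35],\
-- [36,37,38,39,40,41,42,43,44],\
-- [45,46,47,48,49,50,51,52,53],\
-- [54,55,56,57,58,59,60,61,62],\
-- [63,64,65,66,67,68,69,70,71],\
-- [72,73,74,75,76,77,78,79,80,],\
-- #Top to Bottom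
-- [0,9,18,27,36,45,54,63,72],\
-- [1,10,19,28,37,46,55,64,73],\
-- [2,11,20,29,38,47,56,65,74],\
-- [3,12,21,30,39,48,57,66,75],\
-- [4,13,22,31,40,49,58,67,76],\
-- [5,14,23,32,41,50,59,68,77],\
-- [6,15,24,33,42,51,60,69,78],\
-- [7,16,25,34,43,52,61,70,79],\
-- [8,17,26,35,44,53,62,71,80],\
-- #Boxes in order
-- [0,1,2,9,10,11,18,19,20],\
-- [3,4,5,12,13,14,21,22,23],\
-- [6,7,8,15,16,17,24,25,26],\
-- [27,28,29,36,37,38,45,46,47],\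
-- [30,31,32,39,40,41,48,49,50],\
-- [33,34,35,42,43,44,51,52,53],\
-- [54,55,56,63,64,65,72,73,74],\
-- [57,58,59,66,67,68,75,76,77],\
-- [60,61,62,69,70,71,78,79,80]\
-- ]
--
-- def rettbneighbors(num):
--     topbot = []
--     for x in range(9,18):
--         if (num in Cliques[x]):
--             for val in Cliques[x]:
--                 if (val != num):
--                     topbot.append([int(val/9),val%9])
--     return topbot
-- ===== SOURCE B (Python) =====
-- def rettbneighbors(num):
--     if num in range(81):
--         col = num % 9
--         return [[val // 9, col] for val in range(col, 81, 9) if val != num]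
--     return []
-- ===== Notes on version B (the rewrite author's own statement) =====
-- stated objective: simpler
-- what changed: Eliminates the Cliques lookup table for this function: instead of scanning the nine column rows of the table with membership tests and an inner loop over the matched row, B computes the cell's column by a modulo operation and generates the neighbor coordinates directly with one strided-range comprehension.
import Mathlib
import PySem

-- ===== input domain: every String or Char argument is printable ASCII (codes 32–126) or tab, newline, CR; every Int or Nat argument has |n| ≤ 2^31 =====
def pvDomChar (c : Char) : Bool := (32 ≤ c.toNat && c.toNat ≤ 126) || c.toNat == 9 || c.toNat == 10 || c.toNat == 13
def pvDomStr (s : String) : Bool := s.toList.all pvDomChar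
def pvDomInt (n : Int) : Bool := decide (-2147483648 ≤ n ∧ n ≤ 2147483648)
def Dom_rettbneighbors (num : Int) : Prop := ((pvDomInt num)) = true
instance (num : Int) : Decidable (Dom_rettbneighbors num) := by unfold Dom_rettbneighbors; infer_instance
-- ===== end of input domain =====

-- B eliminates the Cliques table: it computes the column as num % 9 directly (simpler, no table scan).

-- ===== PORT A =====
-- the module-level Cliques table (27 rows: rows, columns, boxes)
def pvCliques : List (List Int) := [
  [0,1,2,3,4,5,6,7,8],
  [9,10,11,12,13,14,15,16,17],
  [18,19,20,21,22,23,24,25,26],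
  [27,28,29,30,31,32,33,34,35],
  [36,37,38,39,40,41,42,43,44],
  [45,46,47,48,49,50,51,52,53],
  [54,55,56,57,58,59,60,61,62],
  [63,64,65,66,67,68,69,70,71],
  [72,73,74,75,76,77,78,79,80],
  [0,9,18,27,36,45,54,63,72],
  [1,10,19,28,37,46,55,64,73],
  [2,11,20,29,38,47,56,65,74],
  [3,12,21,30,39,48,57,66,75],
  [4,13,22,31,40,49,58,67,76],
  [5,14,23,32,41,50,59,68,77],
  [6,15,24,33,42,51,60,69,78],
  [7,16,25,34,43,52,61,70,79],
  [8,17,26,35,44,53,62,71,80],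
  [0,1,2,9,10,11,18,19,20],
  [3,4,5,12,13,14,21,22,23],
  [6,7,8,15,16,17,24,25,26],
  [27,28,29,36,37,38,45,46,47],
  [30,31,32,39,40,41,48,49,50],
  [33,34,35,42,43,44,51,52,53],
  [54,55,56,63,64,65,72,73,74],
  [57,58,59,66,67,68,75,76,77],
  [60,61,62,69,70,71,78,79,80]]

-- int(val/9) truncates toward zero; all table entries are ≥ 0, so it equals floor division here (exact)
def rettbneighbors (num : Int) : List (List Int) :=
  (PySem.List.pyRange 9 18 1).foldl (fun topbot x =>
    let clique := (PySem.List.pyGet? pvCliques x).getD []  -- index 9..17 is always in range (exact)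
    if num ∈ clique then
      clique.foldl (fun tb val =>
        if val ≠ num then tb ++ [[PySem.Int.floordiv val 9, PySem.Int.mod val 9]] else tb) topbot
    else topbot) []

-- ===== PORT B =====
def rettbneighbors_alt (num : Int) : List (List Int) :=
  if 0 ≤ num ∧ num < 81 then
    let col := PySem.Int.mod num 9
    (PySem.List.pyRange col 81 9).foldl (fun acc val =>
      if val ≠ num then acc ++ [[PySem.Int.floordiv val 9, col]] else acc) []
  else []

-- ===== PRECONDITION & SPEC =====
def Spec_rettbneighbors (num : Int) (out : List (List Int)) : Prop := out = rettbneighbors_alt num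
instance (num : Int) (out : List (List Int)) : Decidable (Spec_rettbneighbors num out) := by unfold Spec_rettbneighbors; infer_instance

-- ===== CLAIM (what is proved, stated in full; the proofs are below) =====
def Claim_equal_rettbneighbors : Prop := ∀ (num : Int), Dom_rettbneighbors num → Spec_rettbneighbors num (rettbneighbors num)

-- ===== LEMMAS AND PROOFS =====
lemma notmem_clique (num x : Int) (h : num < 0 ∨ 81 ≤ num) :
    num ∉ (PySem.List.pyGet? pvCliques x).getD [] := by
  cases hg : PySem.List.pyGet? pvCliques x with
  | none => simp
  | some c =>
    have hc : c ∈ pvCliques := PySem.List.mem_of_pyGet?_eq_some _ hg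
    have hb : ∀ c ∈ pvCliques, ∀ v ∈ c, 0 ≤ v ∧ v ≤ 80 := by decide
    intro hm
    have := hb c hc num hm
    omega

lemma rettbneighbors_out (num : Int) (h : num < 0 ∨ 81 ≤ num) : rettbneighbors num = [] := by
  simp only [rettbneighbors]
  generalize PySem.List.pyRange 9 18 1 = xs
  induction xs with
  | nil => rfl
  | cons x xs ih => simpa [List.foldl, if_neg (notmem_clique num x h)] using ih

lemma rettbneighbors_alt_out (num : Int) (h : num < 0 ∨ 81 ≤ num) : rettbneighbors_alt num = [] := by
  simp only [rettbneighbors_alt]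
  rw [if_neg]
  omega

-- ===== VERDICT (by name: the statement is the Claim_ definition above) =====
theorem rettbneighbors_spec : Claim_equal_rettbneighbors := by
  intro num _
  unfold Spec_rettbneighbors
  by_cases h : 0 ≤ num ∧ num < 81
  · obtain ⟨h1, h2⟩ := h
    interval_cases num <;> decide
  · rw [rettbneighbors_out num (by omega), rettbneighbors_alt_out num (by omega)]
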